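-- pv_equiv track=rewrite | github.com/Ang107/kyo_pro | Library/Python/tree.py | tree_dp_pretreatment
-- ===== SOURCE A (Python) =====
-- def tree_dp_pretreatment(g: list[list[int]], s: int = 0):
--     """
--     s: 根
--     g: グラフ
--     木DPの前処理
--     頂点sを根としたときに、子から順に頂点を並べた結果と、
--     親 to 子のグラフ
--     子 to 親のグラフを返す。
--     """
--     from collections import deque
--
--     n = len(g)
--     order = []
--     deq = deque([s])
--     visited = [False] * n
--     visited[s] = True
--     to_child = [[] for _ in range(n)]
--     to_pearent = [[] for _ in range(n)]
--     while deq: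
--         v = deq.popleft()
--         order.append(v)
--         for next in g[v]:
--             if visited[next] == False:
--                 visited[next] = True
--                 deq.append(next)
--                 to_child[v].append(next)
--                 to_pearent[next].append(v)
--     order = order[::-1]
--     return order, to_child, to_pearent
-- ===== SOURCE B (Python) =====
-- def tree_dp_pretreatment(g: list[list[int]], s: int = 0):
--     """
--     s: 根, g: グラフ.
--     Level-synchronous recursive expansion instead of a deque-driven BFS loop:
--     each call consumes one whole frontier generation and builds the reversed
--     order back-to-front (deepest level first), so no queue and no final reverse.
--     """
--     n = len(g)
--     seen = [False] * n
--     seen[s] = True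
--     to_child = [[] for _ in range(n)]
--     to_parent = [[] for _ in range(n)]
--
--     def expand(frontier):
--         if not frontier:
--             return []
--         nxt = []
--         for v in frontier:
--             for u in g[v]:
--                 if not seen[u]:
--                     seen[u] = True
--                     nxt.append(u)
--                     to_child[v].append(u)
--                     to_parent[u].append(v)
--         return expand(nxt) + frontier[::-1]
--
--     return expand([s]), to_child, to_parent
-- ===== Notes on version B (the rewrite author's own statement) =====
-- stated objective: alternative
-- what changed: B replaces the deque-driven BFS while-loop by a recursive level-synchronous expansion: each call processes one whole frontier generation into the next, and the reversed order is built back-to-front as expand(next_level) + reversed(frontier), so there is no queue, no per-vertex pop and no final order[::-1].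
import Mathlib
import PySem

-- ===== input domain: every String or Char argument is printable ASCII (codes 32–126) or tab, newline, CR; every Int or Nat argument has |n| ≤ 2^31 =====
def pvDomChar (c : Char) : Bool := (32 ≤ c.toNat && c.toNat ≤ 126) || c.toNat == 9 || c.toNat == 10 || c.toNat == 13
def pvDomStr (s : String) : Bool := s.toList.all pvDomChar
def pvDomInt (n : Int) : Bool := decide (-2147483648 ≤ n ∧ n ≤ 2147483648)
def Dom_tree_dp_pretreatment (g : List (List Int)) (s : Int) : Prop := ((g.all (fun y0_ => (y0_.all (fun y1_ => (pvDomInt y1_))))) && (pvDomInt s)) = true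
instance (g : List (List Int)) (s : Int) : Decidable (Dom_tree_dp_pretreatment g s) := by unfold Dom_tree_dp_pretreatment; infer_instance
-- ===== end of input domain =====

-- B replaces A's deque-driven BFS while-loop by a recursive level-synchronous expansion
-- that builds the reversed order back-to-front (objective: alternative decomposition).

-- i is a valid Python index into a list of length n (negative indices wrap)
abbrev pvValid (n : Nat) (i : Int) : Prop := -(n : Int) ≤ i ∧ i < (n : Int)

-- the position a valid Python index i addresses (negative indices wrap around)
def pvIdx (n : Nat) (i : Int) : Nat := if i < 0 then (i + n).toNat else i.toNat

lemma pvIdx_lt (n : Nat) (i : Int) (h : pvValid n i) : pvIdx n i < n := by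
  unfold pvIdx; split <;> omega

-- xs[i] with Python index semantics; d outside the valid range (Pre_ keeps every
-- index Python evaluates valid, so the default is never the computed value there)
def pvGetI {α : Type} (l : List α) (i : Int) (d : α) : α :=
  if h : pvValid l.length i then l[pvIdx l.length i]'(pvIdx_lt _ _ h) else d

-- xs[i] = f(xs[i]) with Python index semantics (no-op outside the valid range)
def pvModI {α : Type} (l : List α) (i : Int) (f : α → α) : List α :=
  if pvValid l.length i then l.modify (pvIdx l.length i) f else l

-- ===== PORT A =====
-- inner `for next in g[v]:` loop of A, state (deq, visited, to_child, to_pearent)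
def pvInnerA (v : Int) (st : List Int × List Bool × List (List Int) × List (List Int))
    (row : List Int) : List Int × List Bool × List (List Int) × List (List Int) :=
  row.foldl (fun st nxt =>
    let (deq, vis, tc, tp) := st
    if pvGetI vis nxt true = false then
      (deq ++ [nxt], pvModI vis nxt (fun _ => true),
       pvModI tc v (fun l => l ++ [nxt]), pvModI tp nxt (fun l => l ++ [v]))
    else (deq, vis, tc, tp)) st

-- `while deq:` loop of A; fuel g.length is enough: each iteration pops one vertex and
-- every vertex is enqueued at most once, so the queue empties within g.length pops
def pvLoopA (g : List (List Int)) :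
    Nat → List Int → List Bool → List Int → List (List Int) → List (List Int) →
    List Int × List (List Int) × List (List Int)
  | 0, _, _, order, tc, tp => (order.reverse, tc, tp)
  | fuel+1, deq, vis, order, tc, tp =>
    match deq with
    | [] => (order.reverse, tc, tp)
    | v :: rest =>
      let st := pvInnerA v (rest, vis, tc, tp) (pvGetI g v [])
      pvLoopA g fuel st.1 st.2.1 (order ++ [v]) st.2.2.1 st.2.2.2

def tree_dp_pretreatment (g : List (List Int)) (s : Int) :
    List Int × List (List Int) × List (List Int) :=
  let n := g.length
  pvLoopA g n [s] (pvModI (List.replicate n false) s (fun _ => true)) []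
    (List.replicate n ([] : List Int)) (List.replicate n ([] : List Int))

-- ===== PORT B =====
-- body of `for u in g[v]:` inside expand, state (nxt, seen, to_child, to_parent)
def pvScanB (g : List (List Int)) (st : List Int × List Bool × List (List Int) × List (List Int))
    (v : Int) : List Int × List Bool × List (List Int) × List (List Int) :=
  (pvGetI g v []).foldl (fun st u =>
    let (nxt, seen, tc, tp) := st
    if pvGetI seen u true = false then
      (nxt ++ [u], pvModI seen u (fun _ => true),
       pvModI tc v (fun l => l ++ [u]), pvModI tp u (fun l => l ++ [v]))
    else (nxt, seen, tc, tp)) st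

-- `for v in frontier:` of expand, collecting the next level from nxt = []
def pvLevelB (g : List (List Int)) (frontier : List Int)
    (st : List Bool × List (List Int) × List (List Int)) :
    List Int × List Bool × List (List Int) × List (List Int) :=
  frontier.foldl (pvScanB g) ([], st.1, st.2.1, st.2.2)

-- the recursive expand; fuel g.length + 1 suffices: each nonempty frontier adds at
-- least one newly seen vertex, so there are at most g.length nonempty levels
def pvExpand (g : List (List Int)) :
    Nat → List Int → List Bool × List (List Int) × List (List Int) →
    List Int × List Bool × List (List Int) × List (List Int)
  | 0, _, st => ([], st.1, st.2.1, st.2.2)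
  | fuel+1, frontier, st =>
    match frontier with
    | [] => ([], st.1, st.2.1, st.2.2)
    | _ :: _ =>
      let r := pvLevelB g frontier st
      let rc := pvExpand g fuel r.1 (r.2.1, r.2.2.1, r.2.2.2)
      (rc.1 ++ frontier.reverse, rc.2.1, rc.2.2.1, rc.2.2.2)

def tree_dp_pretreatment_alt (g : List (List Int)) (s : Int) :
    List Int × List (List Int) × List (List Int) :=
  let n := g.length
  let r := pvExpand g (n+1) [s]
    (pvModI (List.replicate n false) s (fun _ => true),
     List.replicate n ([] : List Int), List.replicate n ([] : List Int))
  (r.1, r.2.2.1, r.2.2.2)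

-- ===== PRECONDITION & SPEC =====
-- one expansion step of the set of root-reachable positions: a position whose row consists
-- of valid indices contributes the positions those indices address
def pvReachStep (g : List (List Int)) (R : List Nat) : List Nat :=
  R.foldl (fun acc v =>
    if ∀ e ∈ g.getD v [], pvValid g.length e then
      (g.getD v []).foldl (fun acc e =>
        if pvIdx g.length e ∈ acc then acc else acc ++ [pvIdx g.length e]) acc
    else acc) R

def pvReachN (g : List (List Int)) : Nat → List Nat → List Nat
  | 0, R => R
  | k+1, R => pvReachN g k (pvReachStep g R)

-- all positions reachable from the root through rows made of valid indices
def pvReach (g : List (List Int)) (s : Int) : List Nat :=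
  pvReachN g g.length [pvIdx g.length s]

-- Pre_: exactly the inputs on which Python A returns: the root is a valid (possibly
-- negative, Python-style) index and every row the BFS reaches holds only valid
-- indices; on every other input A raises IndexError.
def Pre_tree_dp_pretreatment (g : List (List Int)) (s : Int) : Prop :=
  pvValid g.length s ∧
  ∀ c ∈ pvReach g s, ∀ e ∈ g.getD c [], pvValid g.length e
instance (g : List (List Int)) (s : Int) : Decidable (Pre_tree_dp_pretreatment g s) := by
  unfold Pre_tree_dp_pretreatment; infer_instance

def pvWitness_tree_dp_pretreatment : List (List Int) × Int := ([[1, 2], [0], [0]], 0)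

def Spec_tree_dp_pretreatment (g : List (List Int)) (s : Int)
    (out : List Int × List (List Int) × List (List Int)) : Prop :=
  out = tree_dp_pretreatment_alt g s
instance (g : List (List Int)) (s : Int) (out : List Int × List (List Int) × List (List Int)) :
    Decidable (Spec_tree_dp_pretreatment g s out) := by
  unfold Spec_tree_dp_pretreatment; infer_instance

-- ===== CLAIM (what is proved, stated in full; the proofs are below) =====
def Claim_equal_tree_dp_pretreatment : Prop :=
  ∀ (g : List (List Int)) (s : Int), Dom_tree_dp_pretreatment g s →
    Pre_tree_dp_pretreatment g s →
    Spec_tree_dp_pretreatment g s (tree_dp_pretreatment g s)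

-- ===== LEMMAS AND PROOFS =====

lemma pvModI_in {α : Type} (l : List α) (i : Int) (f : α → α) (h : pvValid l.length i) :
    pvModI l i f = l.modify (pvIdx l.length i) f := if_pos h

lemma pvModI_length {α : Type} (l : List α) (i : Int) (f : α → α) :
    (pvModI l i f).length = l.length := by
  unfold pvModI; split <;> simp

-- a false read through pvGetI pins the index valid and the entry false
lemma pvGetI_false (l : List Bool) (u : Int) (h : pvGetI l u true = false) :
    ∃ hv : pvValid l.length u, l[pvIdx l.length u]'(pvIdx_lt _ _ hv) = false := by
  unfold pvGetI at h
  split at h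
  · exact ⟨by assumption, h⟩
  · exact absurd h (by simp)

lemma pvCount_modify_true (l : List Bool) (j : Nat) (hj : j < l.length)
    (hn : l[j] = false) :
    (l.modify j (fun _ => true)).countP (fun b => b) = l.countP (fun b => b) + 1 := by
  rw [List.modify_eq_set_get _ hj, List.set_eq_take_cons_drop _ hj]
  conv_rhs => rw [show l = l.take j ++ l.drop j from (List.take_append_drop j l).symm,
    List.drop_eq_getElem_cons hj]
  simp [List.countP_append, hn]
  omega

-- A's inner loop only appends to the deque: a deque prefix passes through untouched
lemma pvInnerA_prefix (v : Int) (row : List Int) :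
    ∀ (d1 d2 : List Int) (vis : List Bool) (tc tp : List (List Int)),
      pvInnerA v (d1 ++ d2, vis, tc, tp) row =
        (d1 ++ (pvInnerA v (d2, vis, tc, tp) row).1, (pvInnerA v (d2, vis, tc, tp) row).2) := by
  induction row with
  | nil => intro d1 d2 vis tc tp; rfl
  | cons u rest ih =>
    intro d1 d2 vis tc tp
    simp only [pvInnerA, List.foldl_cons] at *
    by_cases h : pvGetI vis u true = false
    · rw [if_pos h, if_pos h]
      rw [List.append_assoc]
      exact ih d1 (d2 ++ [u]) _ _ _
    · rw [if_neg h, if_neg h]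
      exact ih d1 d2 vis tc tp

-- A's inner loop flips one fresh seen-flag per appended vertex
lemma pvInnerA_count (v : Int) (row : List Int) :
    ∀ (d : List Int) (vis : List Bool) (tc tp : List (List Int)),
      (pvInnerA v (d, vis, tc, tp) row).2.1.length = vis.length ∧
      (pvInnerA v (d, vis, tc, tp) row).2.1.countP (fun b => b) + d.length =
        vis.countP (fun b => b) + (pvInnerA v (d, vis, tc, tp) row).1.length := by
  induction row with
  | nil =>
    intro d vis tc tp
    simp [pvInnerA]
  | cons u rest ih =>
    intro d vis tc tp
    simp only [pvInnerA, List.foldl_cons] at *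
    by_cases h : pvGetI vis u true = false
    · rw [if_pos h]
      obtain ⟨hv, hfalse⟩ := pvGetI_false vis u h
      have hcount : (pvModI vis u (fun _ => true)).countP (fun b => b)
          = vis.countP (fun b => b) + 1 := by
        rw [pvModI_in _ _ _ hv]
        exact pvCount_modify_true vis _ (pvIdx_lt _ _ hv) hfalse
      obtain ⟨hl, hc⟩ := ih (d ++ [u]) (pvModI vis u (fun _ => true))
        (pvModI tc v (fun l => l ++ [u])) (pvModI tp u (fun l => l ++ [v]))
      refine ⟨by rw [hl, pvModI_length], ?_⟩
      rw [hcount] at hc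
      simp only [List.length_append, List.length_cons, List.length_nil] at hc ⊢
      omega
    · rw [if_neg h]
      exact ih d vis tc tp
  
-- the empty deque stops A's loop at any fuel
lemma pvLoopA_nil (g : List (List Int)) (fuel : Nat) (vis : List Bool) (order : List Int)
    (tc tp : List (List Int)) :
    pvLoopA g fuel [] vis order tc tp = (order.reverse, tc, tp) := by
  cases fuel <;> rfl

-- consuming one whole frontier F from the front of the deque = folding A's inner
-- loop over F with the trailing part N of the deque as accumulator
lemma pvLoopA_level (g : List (List Int)) (F : List Int) :
    ∀ (k : Nat) (N : List Int) (vis : List Bool) (order : List Int) (tc tp : List (List Int)),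
      pvLoopA g (F.length + k) (F ++ N) vis order tc tp =
        (let r := F.foldl (fun st v => pvInnerA v st (pvGetI g v [])) (N, vis, tc, tp)
         pvLoopA g k r.1 r.2.1 (order ++ F) r.2.2.1 r.2.2.2) := by
  induction F with
  | nil => intro k N vis order tc tp; simp
  | cons v F' ih =>
    intro k N vis order tc tp
    have hfuel : (v :: F').length + k = (F'.length + k) + 1 := by simp; omega
    rw [hfuel]
    simp only [pvLoopA, List.cons_append]
    rw [pvInnerA_prefix v (pvGetI g v []) F' N vis tc tp]
    have := ih k ((pvInnerA v (N, vis, tc, tp) (pvGetI g v [])).1)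
      ((pvInnerA v (N, vis, tc, tp) (pvGetI g v [])).2.1) (order ++ [v])
      ((pvInnerA v (N, vis, tc, tp) (pvGetI g v [])).2.2.1)
      ((pvInnerA v (N, vis, tc, tp) (pvGetI g v [])).2.2.2)
    simp only [List.foldl_cons]
    rw [show (order ++ [v]) ++ F' = order ++ v :: F' by simp] at this
    exact this

-- the same, with nothing behind the frontier in the deque
lemma pvLoopA_level0 (g : List (List Int)) (F : List Int) (k : Nat) (vis : List Bool)
    (order : List Int) (tc tp : List (List Int)) :
    pvLoopA g (F.length + k) F vis order tc tp =
      (let r := F.foldl (fun st v => pvInnerA v st (pvGetI g v [])) ([], vis, tc, tp)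
       pvLoopA g k r.1 r.2.1 (order ++ F) r.2.2.1 r.2.2.2) := by
  have h := pvLoopA_level g F k [] vis order tc tp
  rw [List.append_nil] at h
  exact h

-- B's per-level fold is A's inner fold, vertex by vertex
lemma pvLevelB_eq (g : List (List Int)) (F : List Int) (vis : List Bool)
    (tc tp : List (List Int)) :
    pvLevelB g F (vis, tc, tp) =
      F.foldl (fun st v => pvInnerA v st (pvGetI g v [])) ([], vis, tc, tp) := rfl

-- the level fold preserves the seen length and counts one flag per collected vertex
lemma pvLevelFold_count (g : List (List Int)) (F : List Int) :
    ∀ (N : List Int) (vis : List Bool) (tc tp : List (List Int)),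
      (F.foldl (fun st v => pvInnerA v st (pvGetI g v [])) (N, vis, tc, tp)).2.1.length
        = vis.length ∧
      (F.foldl (fun st v => pvInnerA v st (pvGetI g v [])) (N, vis, tc, tp)).2.1.countP (fun b => b)
          + N.length =
        vis.countP (fun b => b)
          + (F.foldl (fun st v => pvInnerA v st (pvGetI g v [])) (N, vis, tc, tp)).1.length := by
  induction F with
  | nil =>
    intro N vis tc tp
    simp
  | cons v F' ih =>
    intro N vis tc tp
    simp only [List.foldl_cons]
    obtain ⟨hl1, hc1⟩ := pvInnerA_count v (pvGetI g v []) N vis tc tp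
    obtain ⟨hl2, hc2⟩ := ih (pvInnerA v (N, vis, tc, tp) (pvGetI g v [])).1
      (pvInnerA v (N, vis, tc, tp) (pvGetI g v [])).2.1
      (pvInnerA v (N, vis, tc, tp) (pvGetI g v [])).2.2.1
      (pvInnerA v (N, vis, tc, tp) (pvGetI g v [])).2.2.2
    simp only [Prod.mk.eta] at hl2 hc2
    refine ⟨by rw [hl2, hl1], ?_⟩
    omega

-- the coupling: at a level boundary A's remaining loop equals B's expand, with A's
-- processed prefix reappearing reversed at the tail of the order
lemma pvMain (g : List (List Int)) :
    ∀ (fuelB : Nat) (F : List Int) (vis : List Bool) (order : List Int)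
      (tc tp : List (List Int)),
      vis.length = g.length →
      vis.countP (fun b => b) = order.length + F.length →
      g.length + 1 ≤ fuelB + order.length →
      pvLoopA g (g.length - order.length) F vis order tc tp =
        ((pvExpand g fuelB F (vis, tc, tp)).1 ++ order.reverse,
         (pvExpand g fuelB F (vis, tc, tp)).2.2.1,
         (pvExpand g fuelB F (vis, tc, tp)).2.2.2) := by
  intro fuelB
  induction fuelB with
  | zero =>
    intro F vis order tc tp hlen hcnt hfuel
    have := List.countP_le_length (p := fun b => b) (l := vis)
    omega
  | succ fb ih =>
    intro F vis order tc tp hlen hcnt hfuel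
    match F with
    | [] =>
      simp only [pvExpand]
      rw [pvLoopA_nil]
      simp
    | v :: F' =>
      have hcle : vis.countP (fun b => b) ≤ g.length := by
        have := List.countP_le_length (p := fun b => b) (l := vis)
        omega
      have hsplit : g.length - order.length
          = (v :: F').length + (g.length - (order ++ v :: F').length) := by
        simp only [List.length_append, List.length_cons] at *
        omega
      rw [hsplit, pvLoopA_level0]
      simp only [pvExpand, ← pvLevelB_eq]
      obtain ⟨hl, hc⟩ := pvLevelFold_count g (v :: F') [] vis tc tp
      rw [← pvLevelB_eq] at hl hc
      have := ih (pvLevelB g (v :: F') (vis, tc, tp)).1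
        (pvLevelB g (v :: F') (vis, tc, tp)).2.1 (order ++ v :: F')
        (pvLevelB g (v :: F') (vis, tc, tp)).2.2.1
        (pvLevelB g (v :: F') (vis, tc, tp)).2.2.2
        (by rw [hl, hlen])
        (by simp only [List.length_append, List.length_cons, List.length_nil] at *; omega)
        (by simp only [List.length_append, List.length_cons, List.length_nil] at *; omega)
      rw [this]
      simp [List.append_assoc]

-- ===== VERDICT (by name: the statement is the Claim_ definition above) =====
theorem tree_dp_pretreatment_spec : Claim_equal_tree_dp_pretreatment := by
  intro g s _hdom hpre
  obtain ⟨hs, _hrows⟩ := hpre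
  unfold Spec_tree_dp_pretreatment
  have hsn : pvIdx g.length s < g.length := pvIdx_lt _ _ hs
  have hmod : pvModI (List.replicate g.length false) s (fun _ => true)
      = (List.replicate g.length false).modify (pvIdx g.length s) (fun _ => true) := by
    rw [pvModI_in (List.replicate g.length false) s (fun _ => true) (by simpa using hs)]
    simp
  have hlen : (pvModI (List.replicate g.length false) s (fun _ => true)).length = g.length := by
    rw [pvModI_length]; simp
  have hcnt : (pvModI (List.replicate g.length false) s (fun _ => true)).countP (fun b => b)
      = 0 + [s].length := by
    rw [hmod, pvCount_modify_true _ _ (by simpa using hsn) (by simp)]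
    simp
  have hmain := pvMain g (g.length + 1) [s]
    (pvModI (List.replicate g.length false) s (fun _ => true)) []
    (List.replicate g.length ([] : List Int)) (List.replicate g.length ([] : List Int))
    hlen hcnt (by omega)
  simpa [tree_dp_pretreatment, tree_dp_pretreatment_alt] using hmain
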